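-- pv_equiv track=rewrite | github.com/ankyobong/Algorithm_Practice-Python | level1/level1_number_and_sum_of_factors.py | solution
-- ===== SOURCE A (Python) =====
-- def solution(left, right):
--     ent = 0
--     for num in range(left, right+1):
--         calculator = []
--         for a in range(1, num+1):
--             if num % a == 0:
--                 calculator.append(a)
--
--         if int(len(calculator)%2) == 0:
--             ent += num
--         elif int(len(calculator)%2) == 1:
--             ent -= num
--
--     return ent
-- ===== SOURCE B (Python) =====
-- def solution(left, right):
--     if left > right:
--         return 0
--     total = (left + right) * (right - left + 1) // 2
--     k = 1
--     while k * k <= right: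
--         if k * k >= left:
--             total -= 2 * k * k
--         k += 1
--     return total
-- ===== Notes on version B (the rewrite author's own statement) =====
-- stated objective: faster
-- what changed: Replaces the per-number divisor-enumeration scan with a closed-form arithmetic-series sum over [left,right] minus 2*k^2 for each perfect square k^2 in the range (odd divisor count iff positive perfect square), iterating only k up to sqrt(right).
import Mathlib
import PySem

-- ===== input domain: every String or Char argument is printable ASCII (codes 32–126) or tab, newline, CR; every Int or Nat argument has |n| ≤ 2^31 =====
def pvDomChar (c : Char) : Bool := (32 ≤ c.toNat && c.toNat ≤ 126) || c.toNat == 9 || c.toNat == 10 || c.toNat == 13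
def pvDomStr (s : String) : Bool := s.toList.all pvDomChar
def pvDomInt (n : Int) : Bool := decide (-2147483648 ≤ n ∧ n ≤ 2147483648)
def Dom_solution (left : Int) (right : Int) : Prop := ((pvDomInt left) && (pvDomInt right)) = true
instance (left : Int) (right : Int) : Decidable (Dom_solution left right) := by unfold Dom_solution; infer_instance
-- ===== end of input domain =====

-- B replaces A's per-number divisor-enumeration with a closed-form series sum minus 2*k^2 for
-- each perfect square k^2 in [left, right] (odd divisor count iff positive perfect square).

-- ===== PORT A =====
-- the body of A's outer loop: build the divisor list of num, then add or subtract num by its parity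
def solStep (ent : Int) (num : Int) : Int :=
  let calculator : List Int :=
    (PySem.List.pyRange 1 (num + 1) 1).foldl
      (fun acc a => if PySem.Int.mod num a == 0 then acc ++ [a] else acc) []
  if calculator.length % 2 == 0 then ent + num
  else if calculator.length % 2 == 1 then ent - num
  else ent

def solution (left : Int) (right : Int) : Int :=
  (PySem.List.pyRange left (right + 1) 1).foldl solStep 0

-- ===== PORT B =====
-- 'while k*k <= right: if k*k >= left: total -= 2*k*k; k += 1' (k stays ≥ 1, so it is a Nat here)
def sqLoop (left : Int) (right : Int) (k : Nat) (total : Int) : Int :=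
  if h : ((k : Int) * k ≤ right) then
    sqLoop left right (k + 1)
      (if left ≤ (k : Int) * k then total - 2 * ((k : Int) * k) else total)
  else total
termination_by (right + 1 - (k : Int) * k).toNat
decreasing_by
  have h1 : ((k : Int)) * k < ((k : Int) + 1) * ((k : Int) + 1) := by nlinarith [Int.natCast_nonneg k]
  push_cast
  omega

def solution_alt (left : Int) (right : Int) : Int :=
  if left > right then 0
  else sqLoop left right 1 (PySem.Int.floordiv ((left + right) * (right - left + 1)) 2)

-- ===== PRECONDITION & SPEC =====
def Spec_solution (left : Int) (right : Int) (out : Int) : Prop := out = solution_alt left right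
instance (left : Int) (right : Int) (out : Int) : Decidable (Spec_solution left right out) := by unfold Spec_solution; infer_instance

-- ===== CLAIM (what is proved, stated in full; the proofs are below) =====
def Claim_equal_solution : Prop := ∀ (left : Int) (right : Int), Dom_solution left right → Spec_solution left right (solution left right)

-- ===== LEMMAS AND PROOFS =====

theorem sqrt_mul_self' (a : ℕ) : Nat.sqrt (a * a) = a := by
  rw [← pow_two]; exact Nat.sqrt_eq' a

theorem divisors_parity (n : ℕ) (hn : 0 < n) :
    n.divisors.card % 2 = if Nat.sqrt n * Nat.sqrt n = n then 1 else 0 := by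
  set s := n.divisors with hs
  set small := s.filter (fun a => a * a < n) with hsmall
  set big := s.filter (fun a => n < a * a) with hbig
  set mid := s.filter (fun a => a * a = n) with hmid
  have hdisj1 : Disjoint mid big := by
    rw [Finset.disjoint_left]; intro a ha hb
    rw [hmid, Finset.mem_filter] at ha; rw [hbig, Finset.mem_filter] at hb; omega
  have hdisj2 : Disjoint small (mid ∪ big) := by
    rw [Finset.disjoint_left]; intro a ha hb
    rw [hsmall, Finset.mem_filter] at ha
    rw [Finset.mem_union, hmid, hbig, Finset.mem_filter, Finset.mem_filter] at hb
    rcases hb with hb | hb <;> omega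
  have hunion : s = small ∪ (mid ∪ big) := by
    ext a
    rw [Finset.mem_union, Finset.mem_union, hsmall, hmid, hbig,
      Finset.mem_filter, Finset.mem_filter, Finset.mem_filter]
    constructor
    · intro h
      rcases lt_trichotomy (a * a) n with h' | h' | h'
      · exact Or.inl ⟨h, h'⟩
      · exact Or.inr (Or.inl ⟨h, h'⟩)
      · exact Or.inr (Or.inr ⟨h, h'⟩)
    · rintro (⟨h, _⟩ | ⟨h, _⟩ | ⟨h, _⟩) <;> exact h
  have hcard : s.card = small.card + (mid.card + big.card) := by
    rw [hunion, Finset.card_union_of_disjoint hdisj2, Finset.card_union_of_disjoint hdisj1]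
  have hbs : big.card = small.card := by
    apply Finset.card_bij' (i := fun a _ => n / a) (j := fun b _ => n / b)
    · intro a ha
      rw [hbig, Finset.mem_filter, hs, Nat.mem_divisors] at ha
      obtain ⟨⟨hdvd, _⟩, hlt⟩ := ha
      have ha0 : 0 < a := Nat.pos_of_dvd_of_pos hdvd hn
      have hb0 : 0 < n / a := Nat.div_pos (Nat.le_of_dvd hn hdvd) ha0
      have hmul : a * (n / a) = n := Nat.mul_div_cancel' hdvd
      rw [hsmall, Finset.mem_filter, hs, Nat.mem_divisors]
      refine ⟨⟨Nat.div_dvd_of_dvd hdvd, by omega⟩, ?_⟩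
      nlinarith
    · intro b hb
      rw [hsmall, Finset.mem_filter, hs, Nat.mem_divisors] at hb
      obtain ⟨⟨hdvd, _⟩, hlt⟩ := hb
      have hb0 : 0 < b := Nat.pos_of_dvd_of_pos hdvd hn
      have hq0 : 0 < n / b := Nat.div_pos (Nat.le_of_dvd hn hdvd) hb0
      have hmul : b * (n / b) = n := Nat.mul_div_cancel' hdvd
      rw [hbig, Finset.mem_filter, hs, Nat.mem_divisors]
      refine ⟨⟨Nat.div_dvd_of_dvd hdvd, by omega⟩, ?_⟩
      nlinarith
    · intro a ha
      rw [hbig, Finset.mem_filter, hs, Nat.mem_divisors] at ha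
      exact Nat.div_div_self ha.1.1 (by omega)
    · intro b hb
      rw [hsmall, Finset.mem_filter, hs, Nat.mem_divisors] at hb
      exact Nat.div_div_self hb.1.1 (by omega)
  by_cases h : Nat.sqrt n * Nat.sqrt n = n
  · rw [if_pos h]
    have hm : mid = {Nat.sqrt n} := by
      ext a
      rw [hmid, Finset.mem_filter, hs, Nat.mem_divisors, Finset.mem_singleton]
      constructor
      · rintro ⟨_, haa⟩
        have hsq := sqrt_mul_self' a
        rw [haa] at hsq
        exact hsq.symm
      · rintro rfl
        exact ⟨⟨⟨Nat.sqrt n, h.symm⟩, by omega⟩, h⟩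
    have : mid.card = 1 := by rw [hm]; simp
    omega
  · rw [if_neg h]
    have hm : mid = ∅ := by
      ext a
      rw [hmid, Finset.mem_filter]
      simp only [Finset.notMem_empty, iff_false]
      rintro ⟨_, haa⟩
      have hsq := sqrt_mul_self' a
      rw [haa] at hsq
      exact h (by rw [hsq, haa])
    have : mid.card = 0 := by rw [hm]; simp
    omega

def psqb (num : Int) : Bool :=
  decide (1 ≤ num) && ((Nat.sqrt num.toNat : Int) * (Nat.sqrt num.toNat) == num)

theorem psqb_iff (num : Int) : psqb num = true ↔ ∃ k : Nat, 0 < k ∧ (k : Int) * k = num := by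
  unfold psqb
  rw [Bool.and_eq_true, decide_eq_true_iff, beq_iff_eq]
  constructor
  · rintro ⟨h1, h2⟩
    refine ⟨Nat.sqrt num.toNat, ?_, h2⟩
    by_contra h
    have : Nat.sqrt num.toNat = 0 := by omega
    rw [this] at h2; simp at h2; omega
  · rintro ⟨k, hk, hkk⟩
    have h1 : (1 : Int) ≤ num := by nlinarith [Int.natCast_pos.mpr hk]
    refine ⟨h1, ?_⟩
    have hnt : num.toNat = k * k := by
      have : ((k * k : Nat) : Int) = num := by push_cast; exact hkk
      omega
    rw [hnt, Nat.sqrt_eq]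
    exact hkk

-- length of A's divisor list, for positive num
theorem calc_length (n : Nat) (h : 1 ≤ n) :
    ((PySem.List.pyRange 1 ((n : Int) + 1) 1).filter
        (fun a => PySem.Int.mod (n : Int) a == 0)).length = n.divisors.card := by
  rw [PySem.List.pyRange_one]
  rw [List.filter_map, List.length_map, ← List.countP_eq_length_filter]
  have hcast : (((n : Int) + 1 - 1).toNat) = n := by omega
  rw [hcast]
  have hcount : (List.range n).countP
      ((fun a => PySem.Int.mod (n : Int) a == 0) ∘ (fun k : Nat => (1 : Int) + k))
      = (List.range n).countP (fun k => decide ((1 + k) ∣ n)) := by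
    apply List.countP_congr
    intro k _
    have hiff : ((1 : Int) + k) ∣ (n : Int) ↔ (1 + k) ∣ n := by
      rw [show ((1:Int) + k) = ((1 + k : Nat) : Int) by push_cast; ring]
      exact Int.natCast_dvd_natCast
    simp only [Function.comp_apply, beq_iff_eq, decide_eq_true_iff]
    rw [PySem.Int.mod_eq_zero_iff_dvd]
    exact hiff
  rw [hcount]
  have hc2 : (List.range n).countP (fun k => decide ((1 + k) ∣ n))
      = (Finset.filter (fun k => (1 + k) ∣ n) (Finset.range n)).card := by
    rw [← Nat.count_eq_card_filter_range]
    rfl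
  rw [hc2]
  refine Finset.card_bij' (fun a _ => 1 + a) (fun d _ => d - 1) ?hi ?hj ?li ?ri
  case hi =>
    intro a ha
    rw [Finset.mem_filter, Finset.mem_range] at ha
    show 1 + a ∈ n.divisors
    rw [Nat.mem_divisors]
    exact ⟨ha.2, by omega⟩
  case hj =>
    intro d hd
    rw [Nat.mem_divisors] at hd
    have hd1 : 1 ≤ d := Nat.pos_of_dvd_of_pos hd.1 (by omega)
    have hdn : d ≤ n := Nat.le_of_dvd (by omega) hd.1
    show d - 1 ∈ Finset.filter (fun k => (1 + k) ∣ n) (Finset.range n)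
    rw [Finset.mem_filter, Finset.mem_range]
    refine ⟨by omega, ?_⟩
    have he : 1 + (d - 1) = d := by omega
    rw [he]; exact hd.1
  case li => intro a _; show 1 + a - 1 = a; omega
  case ri =>
    intro d hd
    rw [Nat.mem_divisors] at hd
    have : 1 ≤ d := Nat.pos_of_dvd_of_pos hd.1 (by omega)
    show 1 + (d - 1) = d
    omega

theorem solStep_eq (ent num : Int) :
    solStep ent num = ent + (if psqb num then -num else num) := by
  unfold solStep
  simp only []
  rw [PySem.List.foldl_append_if_eq_filter]
  by_cases hpos : 1 ≤ num
  · have hnum : ((num.toNat : Nat) : Int) = num := Int.toNat_of_nonneg (by omega)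
    have hlen : ((PySem.List.pyRange 1 (num + 1) 1).filter
        (fun a => PySem.Int.mod num a == 0)).length = num.toNat.divisors.card := by
      rw [← hnum]; exact calc_length num.toNat (by omega)
    rw [List.nil_append, hlen]
    have hpar := divisors_parity num.toNat (by omega)
    have hps : psqb num = decide (Nat.sqrt num.toNat * Nat.sqrt num.toNat = num.toNat) := by
      unfold psqb
      rw [decide_eq_true (by omega : (1:Int) ≤ num), Bool.true_and]
      have : ((Nat.sqrt num.toNat : Int) * (Nat.sqrt num.toNat) == num)
          = decide (Nat.sqrt num.toNat * Nat.sqrt num.toNat = num.toNat) := by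
        rw [Bool.eq_iff_iff, beq_iff_eq, decide_eq_true_iff]
        constructor
        · intro h'; rw [← hnum] at h'; exact_mod_cast h'
        · intro h'; rw [← hnum]; exact_mod_cast h'
      exact this
    by_cases hsq : Nat.sqrt num.toNat * Nat.sqrt num.toNat = num.toNat
    · rw [if_pos hsq] at hpar
      rw [hps, decide_eq_true hsq]
      simp only [if_true]
      rw [hpar]
      norm_num
      omega
    · rw [if_neg hsq] at hpar
      rw [hps, decide_eq_false hsq]
      simp only [Bool.false_eq_true, if_false]
      rw [hpar]
      norm_num
  · rw [PySem.List.pyRange_one_eq_nil (by omega)]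
    have hps : psqb num = false := by
      unfold psqb
      rw [decide_eq_false hpos, Bool.false_and]
    rw [hps]
    simp

theorem icc_int_split_top (a b : Int) (h : a ≤ b + 1) :
    Finset.Icc a (b + 1) = insert (b + 1) (Finset.Icc a b) := by
  ext x; rw [Finset.mem_insert, Finset.mem_Icc, Finset.mem_Icc]; omega

theorem solution_eq_sum (left right : Int) :
    solution left right = ∑ num ∈ Finset.Icc left right, (if psqb num then -num else num) := by
  by_cases h : left - 1 ≤ right
  · have key : ∀ r : Int, left - 1 ≤ r →
        solution left r = ∑ num ∈ Finset.Icc left r, (if psqb num then -num else num) := by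
      intro r hr
      induction r, hr using Int.le_induction with
      | base =>
        unfold solution
        rw [show left - 1 + 1 = left by ring, PySem.List.pyRange_one_eq_nil (by omega)]
        rw [Finset.Icc_eq_empty (by omega)]
        simp
      | succ n hn ih =>
        unfold solution
        rw [PySem.List.pyRange_one_succ_right (by omega : left ≤ n + 1), List.foldl_append]
        have : (PySem.List.pyRange left (n + 1) 1).foldl solStep 0 = solution left n := rfl
        rw [this, ih, List.foldl_cons, List.foldl_nil, solStep_eq]
        rw [icc_int_split_top left n (by omega), Finset.sum_insert (by rw [Finset.mem_Icc]; omega)]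
        ring
    exact key right h
  · unfold solution
    rw [PySem.List.pyRange_one_eq_nil (by omega), Finset.Icc_eq_empty (by omega)]
    simp
theorem gauss_sum (left right : Int) (h : left ≤ right) :
    (∑ num ∈ Finset.Icc left right, num)
      = PySem.Int.floordiv ((left + right) * (right - left + 1)) 2 := by
  have key : ∀ r : Int, left ≤ r →
      2 * (∑ num ∈ Finset.Icc left r, num) = (left + r) * (r - left + 1) := by
    intro r hr
    induction r, hr using Int.le_induction with
    | base => rw [Finset.Icc_self, Finset.sum_singleton]; ring
    | succ n hn ih =>
      rw [icc_int_split_top left n (by omega), Finset.sum_insert (by rw [Finset.mem_Icc]; omega)]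
      rw [mul_add, ih]; ring
  rw [PySem.Int.floordiv_eq_ediv_of_pos (by norm_num), ← key right h]
  rw [Int.mul_ediv_cancel_left _ (by norm_num)]
theorem squares_reindex (left right : Int) :
    (∑ num ∈ Finset.Icc left right, (if psqb num then num else 0))
      = ∑ k ∈ Finset.Icc 1 (Nat.sqrt right.toNat),
          (if left ≤ (k : Int) * k then (k : Int) * k else 0) := by
  rw [← Finset.sum_filter, ← Finset.sum_filter]
  refine Finset.sum_bij' (i := fun (num : Int) _ => Nat.sqrt num.toNat)
    (j := fun (k : Nat) _ => (k : Int) * k) ?hi ?hj ?li ?ri ?hval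
  case hi =>
    intro num hnum
    rw [Finset.mem_filter, Finset.mem_Icc] at hnum
    obtain ⟨⟨hl, hr⟩, hp⟩ := hnum
    rw [psqb_iff] at hp
    obtain ⟨k, hk0, hkk⟩ := hp
    have hnt : num.toNat = k * k := by
      have : ((k * k : Nat) : Int) = num := by push_cast; exact hkk
      omega
    show Nat.sqrt num.toNat ∈ Finset.filter _ (Finset.Icc 1 (Nat.sqrt right.toNat))
    rw [Finset.mem_filter, Finset.mem_Icc, hnt, Nat.sqrt_eq]
    refine ⟨⟨by omega, ?_⟩, ?_⟩
    · rw [Nat.le_sqrt]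
      have h1 : (1:Int) ≤ num := by nlinarith [Int.natCast_pos.mpr hk0]
      omega
    · rw [hkk]
      omega
  case hj =>
    intro k hk
    rw [Finset.mem_filter, Finset.mem_Icc] at hk
    obtain ⟨⟨h1, h2⟩, h3⟩ := hk
    show (k : Int) * k ∈ Finset.filter _ (Finset.Icc left right)
    rw [Finset.mem_filter, Finset.mem_Icc]
    have hkr : (k : Int) * k ≤ right := by
      rw [Nat.le_sqrt] at h2
      have hr0 : (0:Int) ≤ right := by
        by_contra hc
        push_neg at hc
        have : right.toNat = 0 := by omega
        rw [this] at h2; simp at h2; omega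
      have : ((k*k : Nat) : Int) ≤ (right.toNat : Int) := by exact_mod_cast h2
      push_cast at this
      omega
    refine ⟨⟨h3, hkr⟩, ?_⟩
    rw [psqb_iff]
    exact ⟨k, by omega, rfl⟩
  case li =>
    intro num hnum
    rw [Finset.mem_filter] at hnum
    obtain ⟨_, hp⟩ := hnum
    rw [psqb_iff] at hp
    obtain ⟨k, hk0, hkk⟩ := hp
    have hnt : num.toNat = k * k := by
      have : ((k * k : Nat) : Int) = num := by push_cast; exact hkk
      omega
    show ((Nat.sqrt num.toNat : Nat) : Int) * (Nat.sqrt num.toNat) = num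
    rw [hnt, Nat.sqrt_eq]
    exact hkk
  case ri =>
    intro k hk
    show Nat.sqrt ((k : Int) * k).toNat = k
    have : ((k : Int) * k).toNat = k * k := by
      have : ((k * k : Nat) : Int) = (k : Int) * k := by push_cast; ring
      omega
    rw [this, Nat.sqrt_eq]
  case hval =>
    intro num hnum
    rw [Finset.mem_filter] at hnum
    obtain ⟨_, hp⟩ := hnum
    rw [psqb_iff] at hp
    obtain ⟨k, hk0, hkk⟩ := hp
    have hnt : num.toNat = k * k := by
      have : ((k * k : Nat) : Int) = num := by push_cast; exact hkk
      omega
    show num = ((Nat.sqrt num.toNat : Nat) : Int) * (Nat.sqrt num.toNat)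
    rw [hnt, Nat.sqrt_eq]
    exact hkk.symm
theorem sqSum_zero (left right : Int) (k : Nat) (hk : ¬ ((k : Int) * k ≤ right)) :
    (∑ j ∈ Finset.Icc k (Nat.sqrt right.toNat),
        (if left ≤ (j : Int) * j then (j : Int) * j else 0)) = 0 := by
  rcases Nat.eq_zero_or_pos k with h0 | hpos
  · subst h0
    have hr : right < 0 := by simpa using hk
    have h1 : right.toNat = 0 := by omega
    rw [h1]
    rw [show Finset.Icc 0 (Nat.sqrt 0) = {0} by rfl, Finset.sum_singleton]
    norm_num
  · have hm : Nat.sqrt right.toNat < k := by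
      rw [Nat.sqrt_lt]
      have hb : (1:Int) ≤ (k:Int) * (k:Int) := by nlinarith [Int.natCast_pos.mpr hpos]
      have : (right.toNat : Int) < (k:Int) * k := by omega
      exact_mod_cast this
    rw [Finset.Icc_eq_empty (by omega), Finset.sum_empty]

theorem sqLoop_eq (left right : Int) (k : Nat) (total : Int) :
    sqLoop left right k total
      = total - 2 * ∑ j ∈ Finset.Icc k (Nat.sqrt right.toNat),
          (if left ≤ (j : Int) * j then (j : Int) * j else 0) := by
  suffices H : ∀ m : Nat, ∀ (k : Nat) (total : Int), (right + 1 - (k:Int)*k).toNat ≤ m →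
      sqLoop left right k total
        = total - 2 * ∑ j ∈ Finset.Icc k (Nat.sqrt right.toNat),
            (if left ≤ (j : Int) * j then (j : Int) * j else 0) by
    exact H _ k total le_rfl
  intro m
  induction m with
  | zero =>
    intro k total hm
    have hk : ¬ ((k : Int) * k ≤ right) := by omega
    rw [sqLoop, dif_neg hk, sqSum_zero left right k hk]
    ring
  | succ m ih =>
    intro k total hm
    by_cases hk : (k : Int) * k ≤ right
    · rw [sqLoop, dif_pos hk]
      have hstep : ((right + 1 - ((k+1 : Nat) : Int) * ((k+1 : Nat) : Int)).toNat) ≤ m := by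
        have h1 : ((k : Int)) * k + 1 ≤ ((k : Int) + 1) * ((k : Int) + 1) := by
          nlinarith [Int.natCast_nonneg k]
        push_cast
        omega
      rw [ih (k+1) _ hstep]
      have hkm : k ≤ Nat.sqrt right.toNat := by
        rcases Nat.eq_zero_or_pos k with h0 | hpos
        · rw [Nat.le_sqrt]; omega
        · rw [Nat.le_sqrt]
          have h1 : (1:Int) ≤ (k:Int) * k := by nlinarith [Int.natCast_pos.mpr hpos]
          have : ((k*k : Nat) : Int) ≤ (right.toNat : Int) := by push_cast; omega
          exact_mod_cast this
      have hsplit : Finset.Icc k (Nat.sqrt right.toNat)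
          = insert k (Finset.Icc (k+1) (Nat.sqrt right.toNat)) := by
        ext x; rw [Finset.mem_insert, Finset.mem_Icc, Finset.mem_Icc]; omega
      rw [hsplit, Finset.sum_insert (by rw [Finset.mem_Icc]; omega)]
      by_cases hl : left ≤ (k : Int) * k
      · rw [if_pos hl, if_pos hl]; ring
      · rw [if_neg hl, if_neg hl]; ring
    · rw [sqLoop, dif_neg hk, sqSum_zero left right k hk]
      ring

-- ===== VERDICT (by name: the statement is the Claim_ definition above) =====
theorem solution_spec : Claim_equal_solution := by
  unfold Claim_equal_solution
  intro left right _
  unfold Spec_solution solution_alt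
  by_cases hlr : left > right
  · simp only [hlr, if_true]
    rw [solution_eq_sum]
    rw [Finset.Icc_eq_empty (by omega)]
    simp
  · push_neg at hlr
    simp only [if_neg (by omega : ¬ left > right)]
    rw [sqLoop_eq, solution_eq_sum, ← gauss_sum left right hlr, ← squares_reindex]
    have hpt : ∀ num : Int, (if psqb num then -num else num)
        = num - 2 * (if psqb num then num else 0) := by
      intro num
      by_cases h : psqb num
      · simp [h]; ring
      · simp [h]
    rw [Finset.sum_congr rfl (fun x _ => hpt x), Finset.sum_sub_distrib, ← Finset.mul_sum]
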